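-- pv_equiv track=rewrite | github.com/IBM/Simultaneous-diagonalization | cl_chemistry.py | symbol_latex
-- ===== SOURCE A (Python) =====
-- def symbol_latex(symbol) :
--    symbol_tex = ''
--    flagNumeric = False
--    for c in symbol+' ' :
--       if (c.isdigit()) :
--          if (not flagNumeric) :
--             symbol_tex += '$_{'
--          flagNumeric = True
--       else :
--          if (flagNumeric) :
--             symbol_tex += '}$'
--          flagNumeric = False
--       symbol_tex += c
--    symbol_tex = symbol_tex[:-1]
--    return symbol_tex
-- ===== SOURCE B (Python) =====
-- def symbol_latex(symbol):
--     # Run-splitting decomposition: cut the string into maximal runs of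
--     # digits / non-digits, wrap digit runs in '$_{...}$', join.
--     out = []
--     i = 0
--     n = len(symbol)
--     while i < n:
--         d = symbol[i].isdigit()
--         j = i
--         while j < n and symbol[j].isdigit() == d:
--             j += 1
--         run = symbol[i:j]
--         out.append('$_{' + run + '}$' if d else run)
--         i = j
--     return ''.join(out)
-- ===== Notes on version B (the rewrite author's own statement) =====
-- stated objective: simpler
-- what changed: Replaces the sentinel-space state machine (flagNumeric toggled per character, then chopping the sentinel off with [:-1]) by a direct split into maximal digit/non-digit runs, wrapping each digit run; no sentinel, no flag, no final truncation.
import Mathlib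
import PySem

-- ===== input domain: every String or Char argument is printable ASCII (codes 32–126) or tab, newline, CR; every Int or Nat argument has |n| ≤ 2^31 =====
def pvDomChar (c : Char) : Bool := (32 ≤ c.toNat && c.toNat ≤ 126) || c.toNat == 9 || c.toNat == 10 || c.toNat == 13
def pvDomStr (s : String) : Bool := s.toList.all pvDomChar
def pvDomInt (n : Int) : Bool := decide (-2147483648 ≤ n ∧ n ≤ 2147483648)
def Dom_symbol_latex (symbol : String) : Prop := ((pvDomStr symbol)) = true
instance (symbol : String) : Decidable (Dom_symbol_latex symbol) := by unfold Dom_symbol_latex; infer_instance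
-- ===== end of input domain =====

-- B replaces A's sentinel-space state machine by a split into maximal digit/non-digit
-- runs (objective: simpler); return values proved equal on all of Dom.

-- ===== PORT A =====
-- the loop body of A: state = (symbol_tex so far, flagNumeric)
def symA_step (st : List Char × Bool) (c : Char) : List Char × Bool :=
  if c.isDigit then
    ((if !st.2 then st.1 ++ "$_{".toList else st.1) ++ [c], true)
  else
    ((if st.2 then st.1 ++ "}$".toList else st.1) ++ [c], false)

def symbol_latex (symbol : String) : String :=
  -- for c in symbol+' ': fold the loop body; then symbol_tex[:-1] = drop the last
  -- character (exact: the loop's result is always nonempty)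
  String.ofList (((symbol ++ " ").toList).foldl symA_step ([], false)).1.dropLast

-- ===== PORT B =====
-- B's outer while loop: take the maximal run with the same isdigit-class as the head,
-- wrap it if it is a digit run, recurse on the rest.
def symB_runs : List Char → List Char
  | [] => []
  | c :: cs =>
    let p := fun d => d.isDigit == c.isDigit
    let run := (c :: cs).takeWhile p
    let rest := (c :: cs).dropWhile p
    (if c.isDigit then "$_{".toList ++ run ++ "}$".toList else run) ++ symB_runs rest
termination_by l => l.length
decreasing_by
  simp only [List.dropWhile_cons, beq_self_eq_true, List.length_cons]
  exact Nat.lt_succ_of_le (List.length_dropWhile_le _ _)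

def symbol_latex_alt (symbol : String) : String :=
  String.ofList (symB_runs symbol.toList)

-- ===== PRECONDITION & SPEC =====
def Spec_symbol_latex (symbol : String) (out : String) : Prop := out = symbol_latex_alt symbol
instance (symbol : String) (out : String) : Decidable (Spec_symbol_latex symbol out) := by unfold Spec_symbol_latex; infer_instance

-- ===== CLAIM (what is proved, stated in full; the proofs are below) =====
def Claim_equal_symbol_latex : Prop := ∀ (symbol : String), Dom_symbol_latex symbol → Spec_symbol_latex symbol (symbol_latex symbol)

-- ===== LEMMAS AND PROOFS =====

-- what A's loop appends from state flag onward (proof-side characterisation)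
def procA : List Char → Bool → List Char
  | [], _ => []
  | c :: cs, flag =>
    (if c.isDigit then (if !flag then "$_{".toList else []) ++ [c]
     else (if flag then "}$".toList else []) ++ [c]) ++ procA cs c.isDigit

theorem foldl_symA (l : List Char) (acc : List Char) (flag : Bool) :
    (l.foldl symA_step (acc, flag)).1 = acc ++ procA l flag := by
  induction l generalizing acc flag with
  | nil => simp [procA]
  | cons c cs ih =>
    simp only [List.foldl_cons, procA]
    by_cases hd : c.isDigit <;> cases flag <;>
      simp [symA_step, hd, ih]

theorem procA_nondigit_run (r t : List Char) (h : ∀ c ∈ r, c.isDigit = false) :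
    procA (r ++ t) false = r ++ procA t false := by
  induction r with
  | nil => rfl
  | cons c cs ih =>
    have hc : c.isDigit = false := h c (by simp)
    simp [procA, hc, ih fun d hd => h d (by simp [hd])]

theorem procA_digit_run (r t : List Char) (h : ∀ c ∈ r, c.isDigit = true) :
    procA (r ++ t) true = r ++ procA t true := by
  induction r with
  | nil => rfl
  | cons c cs ih =>
    have hc : c.isDigit = true := h c (by simp)
    simp [procA, hc, ih fun d hd => h d (by simp [hd])]

theorem procA_close (d : Char) (t : List Char) (hd : d.isDigit = false) :
    procA (d :: t) true = "}$".toList ++ procA (d :: t) false := by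
  simp [procA, hd]

-- unfolding lemma for B's well-founded recursion
theorem symB_runs_cons (c : Char) (cs : List Char) :
    symB_runs (c :: cs) =
      (if c.isDigit then
          "$_{".toList ++ (c :: cs).takeWhile (fun d => d.isDigit == c.isDigit) ++ "}$".toList
        else (c :: cs).takeWhile (fun d => d.isDigit == c.isDigit)) ++
        symB_runs ((c :: cs).dropWhile (fun d => d.isDigit == c.isDigit)) := by
  rw [symB_runs]

-- main bridge: A's loop on l ++ [' '] produces B's runs plus the sentinel space
theorem procA_eq_runs_aux : ∀ (n : Nat) (l : List Char), l.length ≤ n →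
    procA (l ++ [' ']) false = symB_runs l ++ [' '] := by
  intro n
  induction n with
  | zero =>
    intro l hl
    have : l = [] := List.eq_nil_of_length_eq_zero (Nat.le_zero.mp hl)
    subst this
    simp [procA, symB_runs]
  | succ n ih =>
    intro l hl
    match l with
    | [] => simp [procA, symB_runs]
    | c :: cs =>
      set p : Char → Bool := fun d => d.isDigit == c.isDigit with hp
      set run := (c :: cs).takeWhile p with hrun
      set rest := (c :: cs).dropWhile p with hrest
      have hsplit : c :: cs = run ++ rest := by
        rw [hrun, hrest, List.takeWhile_append_dropWhile]
      have hlen : rest.length ≤ n := by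
        have h1 : rest.length ≤ cs.length := by
          rw [hrest]
          simp only [List.dropWhile_cons, hp, beq_self_eq_true]
          exact List.length_dropWhile_le _ _
        simp only [List.length_cons] at hl
        omega
      have hmem : ∀ d ∈ run, d.isDigit = c.isDigit := by
        intro d hd
        have := List.mem_takeWhile_imp (hrun ▸ hd)
        simpa [hp] using this
      have hrest_head : ∀ d t, rest = d :: t → d.isDigit ≠ c.isDigit := by
        intro d t hdt hdig
        have := List.head?_dropWhile_not p (c :: cs)
        rw [← hrest] at this
        simp [hdt, hp, hdig] at this
      have hne : run ≠ [] := by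
        rw [hrun]; simp [hp]
      rw [symB_runs_cons, ← hp, ← hrun, ← hrest, hsplit, List.append_assoc]
      by_cases hc : c.isDigit
      · -- digit run: opens '$_{', copies the run, then rest (or the sentinel) closes it
        obtain ⟨r0, rs, hr⟩ := List.exists_cons_of_ne_nil hne
        have hr0 : r0.isDigit = true := by rw [hmem r0 (by simp [hr])]; exact hc
        rw [hr, List.cons_append, procA, hr0]
        simp only [Bool.not_false]
        rw [procA_digit_run rs (rest ++ [' ']) (fun d hd => by rw [hmem d (by simp [hr, hd])]; exact hc)]
        have hclose : procA (rest ++ [' ']) true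
            = "}$".toList ++ procA (rest ++ [' ']) false := by
          cases hre : rest with
          | nil => simp [procA]
          | cons d t =>
            have : d.isDigit = false := by
              have := hrest_head d t hre; simpa [hc] using this
            exact procA_close d (t ++ [' ']) this
        rw [hclose, ih rest hlen]
        simp [hc]
      · -- non-digit run: copied verbatim
        have hall : ∀ d ∈ run, d.isDigit = false := by
          intro d hd; rw [hmem d hd]; simpa using hc
        rw [procA_nondigit_run run (rest ++ [' ']) hall, ih rest hlen]
        simp [hc]

theorem procA_eq_runs (l : List Char) :
    procA (l ++ [' ']) false = symB_runs l ++ [' '] :=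
  procA_eq_runs_aux l.length l le_rfl

-- ===== VERDICT (by name: the statement is the Claim_ definition above) =====
theorem symbol_latex_spec : Claim_equal_symbol_latex := by
  intro symbol _
  show symbol_latex symbol = symbol_latex_alt symbol
  unfold symbol_latex symbol_latex_alt
  have : (symbol ++ " ").toList = symbol.toList ++ [' '] := by
    simp [String.toList_append]
  rw [this, foldl_symA, List.nil_append, procA_eq_runs]
  simp
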